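-- pv_equiv track=rewrite | github.com/renamachuca/Juego-del-gato-y-el-rat-n | juego.2.py | juego_terminado
-- ===== SOURCE A (Python) =====
-- Gato = "G"
--
-- Raton = "R"
--
-- def juego_terminado(tablero):
--     for i in range(len(tablero)):
--         for k in range(len(tablero[i])):
--             if tablero[i][k] == Raton:
--                 # Verifica si hay un Gato en la posición de arriba, abajo, izquierda y derecha
--                 if (i > 0 and tablero[i-1][k] == Gato) or \
--                     (i < len(tablero) - 1 and tablero[i+1][k] == Gato) or \
--                     (k > 0 and tablero[i][k-1] == Gato) or \
--                     (k < len(tablero[i]) - 1 and tablero[i][k+1] == Gato):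
--                     return True
--     return False
-- ===== SOURCE B (Python) =====
-- Gato = "G"
--
-- Raton = "R"
--
-- def juego_terminado(tablero):
--     # Shift-and-compare: a Rat is adjacent to a Cat iff some adjacent pair of
--     # cells (horizontally within a row, or vertically between consecutive rows)
--     # holds {Cat, Rat}. Scan the pairwise zips instead of probing neighbours.
--     def par(a, b):
--         return (a == Gato and b == Raton) or (a == Raton and b == Gato)
--     if any(par(a, b) for fila in tablero for a, b in zip(fila, fila[1:])):
--         return True
--     return any(par(a, b) for arriba, abajo in zip(tablero, tablero[1:])
--                for a, b in zip(arriba, abajo))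
-- ===== Notes on version B (the rewrite author's own statement) =====
-- stated objective: alternative
-- what changed: A probes the four neighbour cells of each Rat with explicit bounds checks; B never looks at neighbours of a coordinate at all: it scans the pairwise zips of each row with its own shift (horizontal adjacency) and of the board with its row-shift (vertical adjacency), returning True iff some adjacent pair of cells is {Cat, Rat}.
-- outside the precondition, e.g. on juego_terminado([['R'], []]): A raises IndexError, B returns False
import Mathlib
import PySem

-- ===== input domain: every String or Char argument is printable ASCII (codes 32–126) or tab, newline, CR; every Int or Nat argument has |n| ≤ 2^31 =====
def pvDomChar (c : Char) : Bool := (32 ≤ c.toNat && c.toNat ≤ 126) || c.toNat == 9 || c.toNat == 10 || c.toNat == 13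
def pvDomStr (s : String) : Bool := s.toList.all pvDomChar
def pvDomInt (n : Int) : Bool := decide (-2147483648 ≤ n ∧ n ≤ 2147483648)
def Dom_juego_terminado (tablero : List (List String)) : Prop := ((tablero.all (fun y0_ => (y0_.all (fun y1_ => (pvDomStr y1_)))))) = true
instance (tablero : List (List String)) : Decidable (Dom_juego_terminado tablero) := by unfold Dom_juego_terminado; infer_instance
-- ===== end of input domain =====

-- B replaces A's per-Rat neighbour probing by a shift-and-compare scan of the pairwise
-- zips (row with its shift, board with its row shift), an alternative algorithm, same cost.

-- ===== PORT A =====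
-- tablero[i][k]; inside Pre_ every access A performs is in range, so getD is exact there
def pvCellA (t : List (List String)) (i k : Nat) : String := (t.getD i []).getD k ""

-- the four-way neighbour test of A's inner 'if' (same clauses, same order)
def pvHitA (t : List (List String)) (i k : Nat) : Bool :=
  decide ((0 < i ∧ pvCellA t (i-1) k = "G") ∨
          ((i : Int) < (t.length : Int) - 1 ∧ pvCellA t (i+1) k = "G") ∨
          (0 < k ∧ pvCellA t i (k-1) = "G") ∨
          ((k : Int) < ((t.getD i []).length : Int) - 1 ∧ pvCellA t i (k+1) = "G"))

-- 'for k in range(len(tablero[i]))' with early return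
def pvLoopK (t : List (List String)) (i k : Nat) : Bool :=
  if h : k < (t.getD i []).length then
    if pvCellA t i k = "R" ∧ pvHitA t i k = true then true else pvLoopK t i (k+1)
  else false
termination_by (t.getD i []).length - k
decreasing_by omega

-- 'for i in range(len(tablero))' with early return
def pvLoopI (t : List (List String)) (i : Nat) : Bool :=
  if h : i < t.length then
    if pvLoopK t i 0 then true else pvLoopI t (i+1)
  else false
termination_by t.length - i
decreasing_by omega

def juego_terminado (tablero : List (List String)) : Bool := pvLoopI tablero 0

-- ===== PORT B =====
-- par(a, b): the unordered {Cat, Rat} test of Source B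
def pvPar (a b : String) : Bool := (a == "G" && b == "R") || (a == "R" && b == "G")

-- Source B: horizontal scan 'zip(fila, fila[1:])' per row; if none hits,
-- vertical scan 'zip(tablero, tablero[1:])' with 'zip(arriba, abajo)' inside
def juego_terminado_alt (tablero : List (List String)) : Bool :=
  if tablero.any (fun fila => (fila.zip fila.tail).any (fun q => pvPar q.1 q.2)) then true
  else (tablero.zip tablero.tail).any
         (fun p => (p.1.zip p.2).any (fun q => pvPar q.1 q.2))

-- ===== PRECONDITION & SPEC =====
-- Pre_ excludes jagged boards on which some Rat's vertical neighbour row is shorter than the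
-- Rat's column: there A's unguarded tablero[i-1][k] / tablero[i+1][k] access may raise
-- IndexError (when an earlier Rat short-circuits first, A still returns but the corner is A's accident).
def Pre_juego_terminado (tablero : List (List String)) : Prop :=
  ∀ i ∈ List.range tablero.length, ∀ k ∈ List.range (tablero.getD i []).length,
    (tablero.getD i []).getD k "" = "R" →
      (0 < i → k < (tablero.getD (i-1) []).length) ∧
      (i + 1 < tablero.length → k < (tablero.getD (i+1) []).length)
instance (tablero : List (List String)) : Decidable (Pre_juego_terminado tablero) := by
  unfold Pre_juego_terminado; infer_instance

def pvWitness_juego_terminado : List (List String) := [["R", "G"], ["G", "."]]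

def Spec_juego_terminado (tablero : List (List String)) (out : Bool) : Prop := out = juego_terminado_alt tablero
instance (tablero : List (List String)) (out : Bool) : Decidable (Spec_juego_terminado tablero out) := by unfold Spec_juego_terminado; infer_instance

-- ===== CLAIM (what is proved, stated in full; the proofs are below) =====
def Claim_equal_juego_terminado : Prop := ∀ (tablero : List (List String)), Dom_juego_terminado tablero → Pre_juego_terminado tablero → Spec_juego_terminado tablero (juego_terminado tablero)

-- ===== LEMMAS AND PROOFS =====

-- some adjacent horizontal pair of the board is {Cat, Rat}
def PvHPair (t : List (List String)) : Prop :=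
  ∃ r j : Nat, r < t.length ∧ j + 1 < (t.getD r []).length ∧
    pvPar ((t.getD r []).getD j "") ((t.getD r []).getD (j+1) "") = true

-- some adjacent vertical pair of the board is {Cat, Rat}
def PvVPair (t : List (List String)) : Prop :=
  ∃ r k : Nat, r + 1 < t.length ∧ k < (t.getD r []).length ∧ k < (t.getD (r+1) []).length ∧
    pvPar ((t.getD r []).getD k "") ((t.getD (r+1) []).getD k "") = true

theorem pv_any_getD {α : Type} (d : α) (l : List α) (p : α → Bool) :
    (l.any p = true) ↔ ∃ i : Nat, i < l.length ∧ p (l.getD i d) = true := by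
  simp only [List.any_eq_true]
  constructor
  · rintro ⟨x, hx, hp⟩
    obtain ⟨i, hi, rfl⟩ := List.mem_iff_getElem.mp hx
    exact ⟨i, hi, by rwa [List.getD_eq_getElem _ _ hi]⟩
  · rintro ⟨i, hi, hp⟩
    exact ⟨l.getD i d, by rw [List.getD_eq_getElem _ _ hi]; exact List.getElem_mem hi,
           hp⟩

theorem pv_zip_any {α : Type} (d : α) (l m : List α) (p : α × α → Bool) :
    ((l.zip m).any p = true) ↔
      ∃ i : Nat, i < l.length ∧ i < m.length ∧ p (l.getD i d, m.getD i d) = true := by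
  rw [pv_any_getD (d, d)]
  constructor
  · rintro ⟨i, hi, hp⟩
    have hlen : i < min l.length m.length := by simpa [List.length_zip] using hi
    have h1 : i < l.length := by omega
    have h2 : i < m.length := by omega
    refine ⟨i, h1, h2, ?_⟩
    have : (l.zip m).getD i (d, d) = (l.getD i d, m.getD i d) := by
      rw [List.getD_eq_getElem _ _ hi, List.getD_eq_getElem _ _ h1,
          List.getD_eq_getElem _ _ h2, List.getElem_zip]
    rwa [this] at hp
  · rintro ⟨i, h1, h2, hp⟩
    have hi : i < (l.zip m).length := by rw [List.length_zip]; omega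
    refine ⟨i, hi, ?_⟩
    have : (l.zip m).getD i (d, d) = (l.getD i d, m.getD i d) := by
      rw [List.getD_eq_getElem _ _ hi, List.getD_eq_getElem _ _ h1,
          List.getD_eq_getElem _ _ h2, List.getElem_zip]
    rwa [this]

theorem pv_getD_tail {α : Type} (d : α) (l : List α) (i : Nat) :
    l.tail.getD i d = l.getD (i+1) d := by
  cases l <;> simp [List.getD]

theorem pv_zip_tail_any {α : Type} (d : α) (l : List α) (p : α × α → Bool) :
    ((l.zip l.tail).any p = true) ↔
      ∃ i : Nat, i + 1 < l.length ∧ p (l.getD i d, l.getD (i+1) d) = true := by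
  rw [pv_zip_any d]
  constructor
  · rintro ⟨i, h1, h2, hp⟩
    rw [List.length_tail] at h2
    exact ⟨i, by omega, by rwa [pv_getD_tail] at hp⟩
  · rintro ⟨i, h, hp⟩
    exact ⟨i, by omega, by rw [List.length_tail]; omega, by rwa [pv_getD_tail]⟩

theorem pv_hAny_iff (t : List (List String)) :
    (t.any (fun fila => (fila.zip fila.tail).any (fun q => pvPar q.1 q.2)) = true) ↔
      PvHPair t := by
  rw [pv_any_getD ([] : List String)]
  constructor
  · rintro ⟨r, hr, hp⟩
    obtain ⟨j, hj, hq⟩ := (pv_zip_tail_any "" _ _).mp hp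
    exact ⟨r, j, hr, hj, hq⟩
  · rintro ⟨r, j, hr, hj, hq⟩
    exact ⟨r, hr, (pv_zip_tail_any "" _ _).mpr ⟨j, hj, hq⟩⟩

theorem pv_vAny_iff (t : List (List String)) :
    ((t.zip t.tail).any (fun p => (p.1.zip p.2).any (fun q => pvPar q.1 q.2)) = true) ↔
      PvVPair t := by
  rw [pv_zip_tail_any ([] : List String)]
  constructor
  · rintro ⟨r, hr, hp⟩
    obtain ⟨k, h1, h2, hq⟩ := (pv_zip_any "" _ _ _).mp hp
    exact ⟨r, k, hr, h1, h2, hq⟩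
  · rintro ⟨r, k, hr, h1, h2, hq⟩
    exact ⟨r, hr, (pv_zip_any "" _ _ _).mpr ⟨k, h1, h2, hq⟩⟩

theorem pv_alt_iff (t : List (List String)) :
    juego_terminado_alt t = true ↔ PvHPair t ∨ PvVPair t := by
  unfold juego_terminado_alt
  by_cases hb : t.any (fun fila => (fila.zip fila.tail).any (fun q => pvPar q.1 q.2)) = true
  · rw [if_pos hb]
    exact iff_of_true rfl (Or.inl ((pv_hAny_iff t).mp hb))
  · rw [if_neg hb, pv_vAny_iff]
    constructor
    · exact Or.inr
    · rintro (h | h)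
      · exact absurd ((pv_hAny_iff t).mpr h) hb
      · exact h

-- pvPar as a proposition
theorem pv_par_iff (a b : String) :
    pvPar a b = true ↔ (a = "G" ∧ b = "R") ∨ (a = "R" ∧ b = "G") := by
  simp [pvPar]

-- A's inner loop as an existential statement
theorem pv_loopK_iff (t : List (List String)) (i : Nat) : ∀ k : Nat,
    pvLoopK t i k = true ↔
      ∃ j : Nat, k ≤ j ∧ j < (t.getD i []).length ∧ pvCellA t i j = "R" ∧ pvHitA t i j = true := by
  suffices H : ∀ n k, (t.getD i []).length - k ≤ n →
      (pvLoopK t i k = true ↔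
        ∃ j : Nat, k ≤ j ∧ j < (t.getD i []).length ∧ pvCellA t i j = "R" ∧ pvHitA t i j = true) by
    intro k; exact H _ k le_rfl
  intro n
  induction n with
  | zero =>
    intro k hk
    rw [pvLoopK]
    have h : ¬ k < (t.getD i []).length := by omega
    simp only [h, dif_neg, not_false_iff]
    constructor
    · intro h'; exact absurd h' (by simp)
    · rintro ⟨j, h1, h2, _⟩; omega
  | succ n ih =>
    intro k hk
    rw [pvLoopK]
    by_cases h : k < (t.getD i []).length
    · rw [dif_pos h]
      by_cases hhit : pvCellA t i k = "R" ∧ pvHitA t i k = true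
      · rw [if_pos hhit]
        exact iff_of_true rfl ⟨k, le_rfl, h, hhit.1, hhit.2⟩
      · rw [if_neg hhit, ih (k+1) (by omega)]
        constructor
        · rintro ⟨j, h1, h2, h3, h4⟩; exact ⟨j, by omega, h2, h3, h4⟩
        · rintro ⟨j, h1, h2, h3, h4⟩
          have hjk : j ≠ k := by
            intro he; exact hhit ⟨by rwa [he] at h3, by rwa [he] at h4⟩
          exact ⟨j, by omega, h2, h3, h4⟩
    · rw [dif_neg h]
      constructor
      · intro h'; exact absurd h' (by simp)
      · rintro ⟨j, h1, h2, _⟩; omega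

-- A's outer loop as an existential statement
theorem pv_loopI_iff (t : List (List String)) : ∀ i : Nat,
    pvLoopI t i = true ↔ ∃ r : Nat, i ≤ r ∧ r < t.length ∧ pvLoopK t r 0 = true := by
  suffices H : ∀ n i, t.length - i ≤ n →
      (pvLoopI t i = true ↔ ∃ r : Nat, i ≤ r ∧ r < t.length ∧ pvLoopK t r 0 = true) by
    intro i; exact H _ i le_rfl
  intro n
  induction n with
  | zero =>
    intro i hi
    rw [pvLoopI]
    have h : ¬ i < t.length := by omega
    simp only [h, dif_neg, not_false_iff]
    constructor
    · intro h'; exact absurd h' (by simp)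
    · rintro ⟨r, h1, h2, _⟩; omega
  | succ n ih =>
    intro i hi
    rw [pvLoopI]
    by_cases h : i < t.length
    · rw [dif_pos h]
      by_cases hk : pvLoopK t i 0 = true
      · rw [if_pos hk]
        exact iff_of_true rfl ⟨i, le_rfl, h, hk⟩
      · rw [if_neg hk, ih (i+1) (by omega)]
        constructor
        · rintro ⟨r, h1, h2, h3⟩; exact ⟨r, by omega, h2, h3⟩
        · rintro ⟨r, h1, h2, h3⟩
          have : r ≠ i := by intro he; exact hk (he ▸ h3)
          exact ⟨r, by omega, h2, h3⟩
    · rw [dif_neg h]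
      constructor
      · intro h'; exact absurd h' (by simp)
      · rintro ⟨r, h1, h2, _⟩; omega

theorem pv_a_iff (t : List (List String)) :
    juego_terminado t = true ↔
      ∃ r j : Nat, r < t.length ∧ j < (t.getD r []).length ∧
        pvCellA t r j = "R" ∧ pvHitA t r j = true := by
  unfold juego_terminado
  rw [pv_loopI_iff]
  constructor
  · rintro ⟨r, _, hr, hk⟩
    rcases (pv_loopK_iff t r 0).mp hk with ⟨j, _, hj, hc, hh⟩
    exact ⟨r, j, hr, hj, hc, hh⟩
  · rintro ⟨r, j, hr, hj, hc, hh⟩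
    exact ⟨r, Nat.zero_le r, hr, (pv_loopK_iff t r 0).mpr ⟨j, Nat.zero_le j, hj, hc, hh⟩⟩

-- under Pre_'s range guarantees, A's "some Rat has a Cat neighbour" coincides with
-- "some adjacent (horizontal or vertical) pair is {Cat, Rat}"
theorem pv_exists_iff (t : List (List String)) (hpre : Pre_juego_terminado t) :
    (∃ r j : Nat, r < t.length ∧ j < (t.getD r []).length ∧
        pvCellA t r j = "R" ∧ pvHitA t r j = true) ↔ (PvHPair t ∨ PvVPair t) := by
  constructor
  · rintro ⟨r, j, hr, hj, hc, hh⟩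
    have hp := hpre r (List.mem_range.mpr hr) j (List.mem_range.mpr hj) hc
    rw [pvHitA, decide_eq_true_eq] at hh
    rcases hh with ⟨h0, hg⟩ | ⟨hd, hg⟩ | ⟨h0, hg⟩ | ⟨hd, hg⟩
    · -- up: cat at (r-1, j) → vertical pair (r-1, r)
      obtain ⟨r', rfl⟩ : ∃ r', r = r' + 1 := ⟨r - 1, by omega⟩
      refine Or.inr ⟨r', j, by omega, ?_, hj, ?_⟩
      · have := hp.1 h0; simpa using this
      · rw [pv_par_iff]
        exact Or.inl ⟨by simpa [pvCellA] using hg, hc⟩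
    · -- down: cat at (r+1, j) → vertical pair (r, r+1)
      have hd' : r + 1 < t.length := by omega
      refine Or.inr ⟨r, j, hd', hj, hp.2 hd', ?_⟩
      rw [pv_par_iff]
      exact Or.inr ⟨hc, hg⟩
    · -- left: cat at (r, j-1) → horizontal pair (j-1, j)
      obtain ⟨j', rfl⟩ : ∃ j', j = j' + 1 := ⟨j - 1, by omega⟩
      refine Or.inl ⟨r, j', hr, hj, ?_⟩
      rw [pv_par_iff]
      exact Or.inl ⟨by simpa [pvCellA] using hg, hc⟩
    · -- right: cat at (r, j+1) → horizontal pair (j, j+1)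
      have hd' : j + 1 < (t.getD r []).length := by omega
      refine Or.inl ⟨r, j, hr, hd', ?_⟩
      rw [pv_par_iff]
      exact Or.inr ⟨hc, hg⟩
  · rintro (⟨r, j, hr, hj, hq⟩ | ⟨r, k, hr, h1, h2, hq⟩)
    · rw [pv_par_iff] at hq
      rcases hq with ⟨hG, hR⟩ | ⟨hR, hG⟩
      · -- (G, R): rat at (r, j+1) with cat to its left
        refine ⟨r, j + 1, hr, hj, hR, ?_⟩
        rw [pvHitA, decide_eq_true_eq]
        exact Or.inr (Or.inr (Or.inl ⟨by omega, by simpa [pvCellA] using hG⟩))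
      · -- (R, G): rat at (r, j) with cat to its right
        refine ⟨r, j, hr, by omega, hR, ?_⟩
        rw [pvHitA, decide_eq_true_eq]
        exact Or.inr (Or.inr (Or.inr ⟨by omega, hG⟩))
    · rw [pv_par_iff] at hq
      rcases hq with ⟨hG, hR⟩ | ⟨hR, hG⟩
      · -- (G, R): rat at (r+1, k) with cat above
        refine ⟨r + 1, k, hr, h2, hR, ?_⟩
        rw [pvHitA, decide_eq_true_eq]
        exact Or.inl ⟨by omega, by simpa [pvCellA] using hG⟩
      · -- (R, G): rat at (r, k) with cat below
        refine ⟨r, k, by omega, h1, hR, ?_⟩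
        rw [pvHitA, decide_eq_true_eq]
        exact Or.inr (Or.inl ⟨by omega, hG⟩)

-- ===== VERDICT (by name: the statement is the Claim_ definition above) =====
theorem juego_terminado_spec : Claim_equal_juego_terminado := by
  intro t _ hpre
  unfold Spec_juego_terminado
  rw [Bool.eq_iff_iff, pv_a_iff, pv_alt_iff]
  exact pv_exists_iff t hpre
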